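-- pv_equiv track=rewrite | github.com/asmit404/GFG_Solutions | Minimize the Difference.py | minimizeDifference
-- ===== SOURCE A (Python) =====
-- def minimizeDifference(n, k, arr):
--     p_max = [0] * n
--     p_min = [0] * n
--     p_max[n - 1] = p_min[n - 1] = arr[n - 1]
--
--     for i in range(n - 2, -1, -1):
--         p_max[i] = max(arr[i], p_max[i + 1])
--         p_min[i] = min(arr[i], p_min[i + 1])
--
--     mini, maxi = arr[0], arr[0]
--     res = p_max[k] - p_min[k]
--
--     for i in range(1, n - k):
--         res = min(res, max(maxi, p_max[i + k]) - min(mini, p_min[i + k]))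
--         mini = min(mini, arr[i])
--         maxi = max(maxi, arr[i])
--     res = min(res, maxi - mini)
--
--     return res
-- ===== SOURCE B (Python) =====
-- def minimizeDifference(n, k, arr):
--     def rest(i):
--         return [arr[j] for j in range(n) if j < i or j >= i + k]
--     return min(max(rest(i)) - min(rest(i)) for i in range(n - k + 1))
-- ===== Notes on version B (the rewrite author's own statement) =====
-- stated objective: simpler
-- what changed: B drops A's precomputed suffix min/max arrays and running prefix accumulators entirely: it is a direct brute force, min over all window starts i of max/min of the elements whose index lies outside [i, i+k), recomputing the extrema per window; O(n^2) instead of O(n), traded for plainness.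
-- outside the precondition, e.g. on minimizeDifference(2, -1, [1, 2, 3]): A returns 0, B returns 1
import Mathlib
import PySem

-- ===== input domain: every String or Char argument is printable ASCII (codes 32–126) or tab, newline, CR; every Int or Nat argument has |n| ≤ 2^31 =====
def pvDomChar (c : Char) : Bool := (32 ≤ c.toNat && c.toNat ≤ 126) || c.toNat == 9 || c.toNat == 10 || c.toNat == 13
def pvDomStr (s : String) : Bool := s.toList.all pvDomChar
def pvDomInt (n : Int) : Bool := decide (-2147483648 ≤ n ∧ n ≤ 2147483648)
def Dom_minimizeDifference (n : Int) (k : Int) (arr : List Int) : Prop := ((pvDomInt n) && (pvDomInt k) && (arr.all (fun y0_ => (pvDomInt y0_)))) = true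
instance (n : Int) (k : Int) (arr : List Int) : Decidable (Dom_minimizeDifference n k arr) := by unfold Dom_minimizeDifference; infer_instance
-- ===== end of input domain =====

-- B drops A's suffix min/max arrays and running prefix extrema entirely: it is a direct brute
-- force taking max/min of the elements outside each removal window — plainer, but O(n^2)
-- instead of A's O(n) (no speed claimed).

-- ===== PORT A =====
-- 'for i in range(n-2, -1, -1): p_max[i] = max(arr[i], p_max[i+1]); p_min[i] = min(arr[i], p_min[i+1])'
def goA (arr : List Int) (i : Int) (pm pn : List Int) : List Int × List Int :=
  if i < 0 then (pm, pn)
  else goA arr (i - 1)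
    (PySem.List.pySetD pm i (max (PySem.List.pyGetD arr i 0) (PySem.List.pyGetD pm (i + 1) 0)))
    (PySem.List.pySetD pn i (min (PySem.List.pyGetD arr i 0) (PySem.List.pyGetD pn (i + 1) 0)))
termination_by (i + 1).toNat
decreasing_by omega

-- p_max = [0]*n; p_min = [0]*n; p_max[n-1] = p_min[n-1] = arr[n-1]; then the two loops
-- (indexing via pyGetD/pySetD, total; exact under Pre_, which keeps every index in range)
def minimizeDifference (n : Int) (k : Int) (arr : List Int) : Int :=
  let v := PySem.List.pyGetD arr (n - 1) 0
  let pm1 := PySem.List.pySetD (List.replicate n.toNat 0) (n - 1) v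
  let pn1 := PySem.List.pySetD (List.replicate n.toNat 0) (n - 1) v
  let pp := goA arr (n - 2) pm1 pn1
  let res0 := PySem.List.pyGetD pp.1 k 0 - PySem.List.pyGetD pp.2 k 0
  let st := (PySem.List.pyRange 1 (n - k) 1).foldl (fun st i =>
      (min st.1 (max st.2.2 (PySem.List.pyGetD pp.1 (i + k) 0)
                 - min st.2.1 (PySem.List.pyGetD pp.2 (i + k) 0)),
       min st.2.1 (PySem.List.pyGetD arr i 0),
       max st.2.2 (PySem.List.pyGetD arr i 0)))
    (res0, PySem.List.pyGetD arr 0 0, PySem.List.pyGetD arr 0 0)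
  min st.1 (st.2.2 - st.2.1)

-- ===== PORT B =====
-- rest(i) = [arr[j] for j in range(n) if j < i or j >= i+k]; min(max(rest(i)) - min(rest(i)) for i in range(n-k+1))
-- (Python's max/min → PySem.List.max?/min?; arr[j] → pyGetD: exact wherever the Python B returns, since a
-- returning B evaluated every rest, so every accessed index was in range and no max/min saw an empty list)
def minimizeDifference_alt (n : Int) (k : Int) (arr : List Int) : Int :=
  let ds := (PySem.List.pyRange 0 (n - k + 1) 1).map (fun i =>
      let rest := ((PySem.List.pyRange 0 n 1).filter
          (fun j => decide (j < i) || decide (i + k ≤ j))).map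
          (fun j => PySem.List.pyGetD arr j 0)
      (PySem.List.max? rest (fun y => y)).getD 0 - (PySem.List.min? rest (fun y => y)).getD 0)
  (PySem.List.min? ds (fun y => y)).getD 0

-- ===== PRECONDITION & SPEC =====
-- Pre_ excludes the inputs where A raises IndexError (n < 1, n > len(arr), k ≥ n, and most k < 0)
-- together with the k < 0 corners where A still returns: k counts removed elements, so k < 0 is outside
-- the function's contract, and there A's value comes from negative-index wraparound into its suffix
-- arrays while B's comes from the removal window [i, i+k) being empty (nothing removed) — neither
-- behaviour is specified, so neither value is matched.
def Pre_minimizeDifference (n : Int) (k : Int) (arr : List Int) : Prop :=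
  1 ≤ n ∧ n ≤ (arr.length : Int) ∧ 0 ≤ k ∧ k < n
instance (n : Int) (k : Int) (arr : List Int) : Decidable (Pre_minimizeDifference n k arr) := by
  unfold Pre_minimizeDifference; infer_instance

def pvWitness_minimizeDifference : Int × Int × List Int := (3, 1, [4, 1, 7])

def Spec_minimizeDifference (n : Int) (k : Int) (arr : List Int) (out : Int) : Prop :=
  out = minimizeDifference_alt n k arr
instance (n : Int) (k : Int) (arr : List Int) (out : Int) : Decidable (Spec_minimizeDifference n k arr out) := by
  unfold Spec_minimizeDifference; infer_instance

-- ===== CLAIM (what is proved, stated in full; the proofs are below) =====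
def Claim_equal_minimizeDifference : Prop := ∀ (n : Int) (k : Int) (arr : List Int), Dom_minimizeDifference n k arr → Pre_minimizeDifference n k arr → Spec_minimizeDifference n k arr (minimizeDifference n k arr)

-- ===== LEMMAS AND PROOFS =====

def mxL : List Int → Int
  | [] => 0
  | x :: xs => xs.foldl max x

def mnL : List Int → Int
  | [] => 0
  | x :: xs => xs.foldl min x

lemma foldl_max_seed (l : List Int) (b : Int) (h : l ≠ []) :
    l.foldl max b = max b (mxL l) := by
  induction l generalizing b with
  | nil => simp at h
  | cons x xs ih =>
    cases hxs : xs with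
    | nil => simp [mxL]
    | cons y ys =>
      have h2 : xs ≠ [] := by simp [hxs]
      rw [← hxs]
      show xs.foldl max (max b x) = max b (mxL (x :: xs))
      rw [ih (max b x) h2]
      have : mxL (x :: xs) = max x (mxL xs) := by
        show xs.foldl max x = _
        rw [ih x h2]
      rw [this, max_assoc]

lemma foldl_min_seed (l : List Int) (b : Int) (h : l ≠ []) :
    l.foldl min b = min b (mnL l) := by
  induction l generalizing b with
  | nil => simp at h
  | cons x xs ih =>
    cases hxs : xs with
    | nil => simp [mnL]
    | cons y ys =>
      have h2 : xs ≠ [] := by simp [hxs]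
      rw [← hxs]
      show xs.foldl min (min b x) = min b (mnL (x :: xs))
      rw [ih (min b x) h2]
      have : mnL (x :: xs) = min x (mnL xs) := by
        show xs.foldl min x = _
        rw [ih x h2]
      rw [this, min_assoc]

lemma mxL_append (l1 l2 : List Int) (h1 : l1 ≠ []) (h2 : l2 ≠ []) :
    mxL (l1 ++ l2) = max (mxL l1) (mxL l2) := by
  cases l1 with
  | nil => simp at h1
  | cons x xs =>
    show (xs ++ l2).foldl max x = _
    rw [List.foldl_append, foldl_max_seed l2 _ h2]
    rfl

lemma mnL_append (l1 l2 : List Int) (h1 : l1 ≠ []) (h2 : l2 ≠ []) :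
    mnL (l1 ++ l2) = min (mnL l1) (mnL l2) := by
  cases l1 with
  | nil => simp at h1
  | cons x xs =>
    show (xs ++ l2).foldl min x = _
    rw [List.foldl_append, foldl_min_seed l2 _ h2]
    rfl

lemma mxL_drop_succ (a : List Int) (j : Nat) (h : j + 1 < a.length) :
    mxL (a.drop j) = max a[j] (mxL (a.drop (j + 1))) := by
  rw [List.drop_eq_getElem_cons (by omega)]
  show (a.drop (j+1)).foldl max a[j] = _
  rw [foldl_max_seed _ _ (by simp; omega)]

lemma mnL_drop_succ (a : List Int) (j : Nat) (h : j + 1 < a.length) :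
    mnL (a.drop j) = min a[j] (mnL (a.drop (j + 1))) := by
  rw [List.drop_eq_getElem_cons (by omega)]
  show (a.drop (j+1)).foldl min a[j] = _
  rw [foldl_min_seed _ _ (by simp; omega)]

lemma mxL_drop_last (a : List Int) (j : Nat) (h : j + 1 = a.length) :
    mxL (a.drop j) = a[j]'(by omega) := by
  rw [List.drop_eq_getElem_cons (by omega)]
  have : a.drop (j+1) = [] := by rw [List.drop_eq_nil_iff]; omega
  rw [this]; rfl

lemma mnL_drop_last (a : List Int) (j : Nat) (h : j + 1 = a.length) :
    mnL (a.drop j) = a[j]'(by omega) := by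
  rw [List.drop_eq_getElem_cons (by omega)]
  have : a.drop (j+1) = [] := by rw [List.drop_eq_nil_iff]; omega
  rw [this]; rfl

lemma mxL_take_succ (a : List Int) (j : Nat) (hj : j < a.length) (h0 : 0 < j) :
    mxL (a.take (j + 1)) = max (mxL (a.take j)) a[j] := by
  rw [List.take_add_one, List.getElem?_eq_getElem hj]
  rw [mxL_append _ _ (List.ne_nil_of_length_pos (by simp; omega)) (by simp)]
  rfl

lemma mnL_take_succ (a : List Int) (j : Nat) (hj : j < a.length) (h0 : 0 < j) :
    mnL (a.take (j + 1)) = min (mnL (a.take j)) a[j] := by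
  rw [List.take_add_one, List.getElem?_eq_getElem hj]
  rw [mnL_append _ _ (List.ne_nil_of_length_pos (by simp; omega)) (by simp)]
  rfl

lemma goA_spec (arr : List Int) (N : Nat) (hN : N ≤ arr.length)
    (i : Int) (pm pn : List Int) : i < (N : Int) - 1 →
    pm.length = N → pn.length = N →
    (∀ j : Nat, i < (j : Int) → j < N →
        PySem.List.pyGetD pm (j : Int) 0 = mxL ((arr.take N).drop j) ∧
        PySem.List.pyGetD pn (j : Int) 0 = mnL ((arr.take N).drop j)) →
    ∀ j : Nat, j < N →
        PySem.List.pyGetD (goA arr i pm pn).1 (j : Int) 0 = mxL ((arr.take N).drop j) ∧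
        PySem.List.pyGetD (goA arr i pm pn).2 (j : Int) 0 = mnL ((arr.take N).drop j) := by
  induction i, pm, pn using goA.induct arr with
  | case1 i pm pn hi =>
    intro _ _ _ hinv j hj
    rw [goA, if_pos hi]
    exact hinv j (by omega) hj
  | case2 i pm pn hi ih =>
    intro hiN hpm hpn hinv
    rw [goA, if_neg hi]
    set t := i.toNat with ht
    have hit : i = (t : Int) := by omega
    have htN : t + 1 < N := by omega
    apply ih
    · omega
    · rw [hit, PySem.List.pySetD_natCast]; simp [hpm]
    · rw [hit, PySem.List.pySetD_natCast]; simp [hpn]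
    · intro j' hj1 hj2
      rw [hit]
      rw [PySem.List.pyGetD_pySetD_natCast pm t j' _ 0 (by omega),
          PySem.List.pyGetD_pySetD_natCast pn t j' _ 0 (by omega)]
      by_cases hjt : j' = t
      · subst hjt
        simp only [if_true]
        have hlen : (arr.take N).length = N := by simp; omega
        have hgetarr : PySem.List.pyGetD arr (t : Int) 0 = ((arr.take N))[t]'(by omega) := by
          rw [PySem.List.pyGetD_natCast, List.getD_eq_getElem _ _ (by omega)]
          simp [List.getElem_take]
        have hnext := hinv (t + 1) (by omega) (by omega)
        have hcast : ((t : Int)) + 1 = (((t+1 : Nat)) : Int) := by omega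
        rw [hcast]
        constructor
        · rw [hnext.1, hgetarr, ← mxL_drop_succ _ t (by omega)]
        · rw [hnext.2, hgetarr, ← mnL_drop_succ _ t (by omega)]
      · simp only [if_neg hjt]
        exact hinv j' (by omega) hj2

def wRange (a : List Int) (K : Nat) (j : Nat) : Int :=
  mxL (a.take j ++ a.drop (j + K)) - mnL (a.take j ++ a.drop (j + K))

def bestW (a : List Int) (K : Nat) : Nat → Int
  | 0 => wRange a K 0
  | c + 1 => min (bestW a K c) (wRange a K (c + 1))

lemma loopA (arr : List Int) (N K : Nat) (pmL pnL : List Int)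
    (hN : N ≤ arr.length) (h1 : 1 ≤ N) (hK : K < N)
    (hPm : ∀ j : Nat, j < N → PySem.List.pyGetD pmL (j : Int) 0 = mxL ((arr.take N).drop j))
    (hPn : ∀ j : Nat, j < N → PySem.List.pyGetD pnL (j : Int) 0 = mnL ((arr.take N).drop j))
    (c : Nat) (hc : c ≤ N - K - 1) :
    (PySem.List.pyRange 1 (1 + (c : Int)) 1).foldl
      (fun st i =>
        (min st.1 (max st.2.2 (PySem.List.pyGetD pmL (i + (K : Int)) 0)
                   - min st.2.1 (PySem.List.pyGetD pnL (i + (K : Int)) 0)),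
         min st.2.1 (PySem.List.pyGetD arr i 0),
         max st.2.2 (PySem.List.pyGetD arr i 0)))
      (wRange (arr.take N) K 0, mnL ((arr.take N).take 1), mxL ((arr.take N).take 1))
    = (bestW (arr.take N) K c, mnL ((arr.take N).take (c + 1)), mxL ((arr.take N).take (c + 1))) := by
  have hlen : (arr.take N).length = N := by simp; omega
  induction c with
  | zero =>
    rw [show (1 + (0:Nat) : Int) = 1 by norm_num, PySem.List.pyRange_one_eq_nil (le_refl 1)]
    rfl
  | succ c ih =>
    have hcN : c + 1 + K < N := by omega
    rw [show (1 + ((c+1:Nat)) : Int) = (1 + (c:Nat)) + 1 by push_cast; ring,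
        PySem.List.pyRange_one_succ_right (by omega), List.foldl_append, ih (by omega)]
    rw [List.foldl_cons, List.foldl_nil]
    have hgetm : PySem.List.pyGetD pmL ((1 + (c:Nat)) + (K:Int)) 0 = mxL ((arr.take N).drop (c+1+K)) := by
      rw [show ((1 + (c:Nat)) + (K:Int)) = (((c+1+K : Nat)) : Int) by push_cast; ring]
      exact hPm _ hcN
    have hgetn : PySem.List.pyGetD pnL ((1 + (c:Nat)) + (K:Int)) 0 = mnL ((arr.take N).drop (c+1+K)) := by
      rw [show ((1 + (c:Nat)) + (K:Int)) = (((c+1+K : Nat)) : Int) by push_cast; ring]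
      exact hPn _ hcN
    have hgeta : PySem.List.pyGetD arr (1 + (c:Nat)) 0 = ((arr.take N))[c+1]'(by omega) := by
      rw [show ((1 + (c:Nat)) : Int) = (((c+1 : Nat)) : Int) by push_cast; ring,
          PySem.List.pyGetD_natCast, List.getD_eq_getElem _ _ (by omega)]
      simp [List.getElem_take]
    have htne : (arr.take N).take (c+1) ≠ [] := List.ne_nil_of_length_pos (by simp; omega)
    have hdne : (arr.take N).drop (c+1+K) ≠ [] := List.ne_nil_of_length_pos (by simp; omega)
    refine Prod.ext ?_ (Prod.ext ?_ ?_)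
    · show min (bestW (arr.take N) K c) _ = bestW (arr.take N) K (c+1)
      rw [hgetm, hgetn, ← mxL_append _ _ htne hdne, ← mnL_append _ _ htne hdne]
      rfl
    · show min (mnL ((arr.take N).take (c+1))) _ = _
      rw [hgeta, ← mnL_take_succ _ (c+1) (by omega) (by omega)]
    · show max (mxL ((arr.take N).take (c+1))) _ = _
      rw [hgeta, ← mxL_take_succ _ (c+1) (by omega) (by omega)]

lemma mnL_append_singleton (a : List Int) (x : Int) (h : a ≠ []) :
    mnL (a ++ [x]) = min (mnL a) x := by
  rw [mnL_append a [x] h (by simp)]; rfl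

lemma max_getD (l : List Int) (h : l ≠ []) :
    (PySem.List.max? l (fun y => y)).getD 0 = mxL l := by
  cases l with
  | nil => simp at h
  | cons x t => rw [PySem.List.max?_id_cons]; rfl

lemma min_getD (l : List Int) (h : l ≠ []) :
    (PySem.List.min? l (fun y => y)).getD 0 = mnL l := by
  cases l with
  | nil => simp at h
  | cons x t => rw [PySem.List.min?_id_cons]; rfl

lemma map_getD_range' (arr : List Int) (s m : Nat) (h : s + m ≤ arr.length) :
    (List.range' s m).map (fun j : Nat => PySem.List.pyGetD arr (j : Int) 0) = (arr.drop s).take m := by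
  induction m generalizing s with
  | zero => simp
  | succ m ih =>
    rw [List.range'_succ, List.map_cons, ih (s + 1) (by omega),
        List.drop_eq_getElem_cons (by omega : s < arr.length), List.take_succ_cons]
    congr 1
    rw [PySem.List.pyGetD_natCast, List.getD_eq_getElem _ _ (by omega)]

lemma restEq (arr : List Int) (N K c : Nat) (hN : N ≤ arr.length) (hc : c + K ≤ N) :
    ((PySem.List.pyRange 0 (N : Int) 1).filter
        (fun j => decide (j < (c : Int)) || decide ((c : Int) + (K : Int) ≤ j))).map
        (fun j => PySem.List.pyGetD arr j 0)
    = (arr.take N).take c ++ (arr.take N).drop (c + K) := by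
  have hsplit : List.range N = List.range' 0 c ++ List.range' c K ++ List.range' (c + K) (N - (c + K)) := by
    have e1 : List.range' 0 c ++ List.range' (0 + c) K = List.range' 0 (c + K) :=
      List.range'_append_1
    have e2 : List.range' 0 (c + K) ++ List.range' (0 + (c + K)) (N - (c + K))
        = List.range' 0 (c + K + (N - (c + K))) := List.range'_append_1
    rw [List.range_eq_range', show N = c + K + (N - (c + K)) by omega, ← e2, ← e1]
    norm_num
  rw [PySem.List.pyRange_zero_natCast, hsplit, List.map_append, List.map_append,
      List.filter_append, List.filter_append]
  have hall1 : ∀ x ∈ (List.range' 0 c).map (fun k : Nat => (k : Int)),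
      (decide (x < (c : Int)) || decide ((c : Int) + (K : Int) ≤ x)) = true := by
    intro x hx
    simp only [List.mem_map, List.mem_range'_1] at hx
    obtain ⟨j, hj, rfl⟩ := hx
    simp only [Bool.or_eq_true, decide_eq_true_eq]
    omega
  have hall2 : ∀ x ∈ (List.range' c K).map (fun k : Nat => (k : Int)),
      ¬ ((decide (x < (c : Int)) || decide ((c : Int) + (K : Int) ≤ x)) = true) := by
    intro x hx
    simp only [List.mem_map, List.mem_range'_1] at hx
    obtain ⟨j, hj, rfl⟩ := hx
    simp only [Bool.or_eq_true, decide_eq_true_eq]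
    omega
  have hall3 : ∀ x ∈ (List.range' (c + K) (N - (c + K))).map (fun k : Nat => (k : Int)),
      (decide (x < (c : Int)) || decide ((c : Int) + (K : Int) ≤ x)) = true := by
    intro x hx
    simp only [List.mem_map, List.mem_range'_1] at hx
    obtain ⟨j, hj, rfl⟩ := hx
    simp only [Bool.or_eq_true, decide_eq_true_eq]
    omega
  rw [List.filter_eq_self.mpr hall1,
      List.filter_eq_nil_iff.mpr hall2,
      List.filter_eq_self.mpr hall3,
      List.append_nil, List.map_append, List.map_map, List.map_map,
      show ((fun j => PySem.List.pyGetD arr j 0) ∘ fun k : Nat => (k : Int))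
        = fun j : Nat => PySem.List.pyGetD arr (j : Int) 0 from rfl,
      map_getD_range' arr 0 c (by omega),
      map_getD_range' arr (c + K) (N - (c + K)) (by omega)]
  congr 1
  · rw [List.drop_zero, List.take_take]
    congr 1
    omega
  · rw [List.drop_take]

lemma loopB (arr : List Int) (N K : Nat)
    (hN : N ≤ arr.length) (h1 : 1 ≤ N) (hK : K < N)
    (c : Nat) (hc : c ≤ N - K) :
    ((PySem.List.pyRange 0 ((c : Int) + 1) 1).map (fun i =>
        let rest := ((PySem.List.pyRange 0 (N : Int) 1).filter
            (fun j => decide (j < i) || decide (i + (K : Int) ≤ j))).map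
            (fun j => PySem.List.pyGetD arr j 0)
        (PySem.List.max? rest (fun y => y)).getD 0 - (PySem.List.min? rest (fun y => y)).getD 0))
      ≠ ([] : List Int) ∧
    mnL ((PySem.List.pyRange 0 ((c : Int) + 1) 1).map (fun i =>
        let rest := ((PySem.List.pyRange 0 (N : Int) 1).filter
            (fun j => decide (j < i) || decide (i + (K : Int) ≤ j))).map
            (fun j => PySem.List.pyGetD arr j 0)
        (PySem.List.max? rest (fun y => y)).getD 0 - (PySem.List.min? rest (fun y => y)).getD 0))
      = bestW (arr.take N) K c := by
  have hlen : (arr.take N).length = N := by simp; omega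
  induction c with
  | zero =>
    rw [show ((0:Nat) : Int) + 1 = 0 + 1 by norm_num, PySem.List.pyRange_one_singleton,
        List.map_cons, List.map_nil]
    refine ⟨by simp, ?_⟩
    dsimp only
    have r0 := restEq arr N K 0 hN (by omega)
    simp only [Nat.cast_zero] at r0
    rw [r0]
    have h0 : (arr.take N).take 0 ++ (arr.take N).drop (0 + K) = (arr.take N).drop (0 + K) := by
      simp
    rw [h0]
    have hdne : (arr.take N).drop (0 + K) ≠ [] := List.ne_nil_of_length_pos (by simp; omega)
    rw [max_getD _ hdne, min_getD _ hdne]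
    rfl
  | succ c ih =>
    obtain ⟨hne, ih⟩ := ih (by omega)
    rw [show (((c+1:Nat)) : Int) + 1 = ((c:Int) + 1) + 1 by push_cast; ring,
        PySem.List.pyRange_one_succ_right (by omega), List.map_append, List.map_cons, List.map_nil]
    refine ⟨by simp, ?_⟩
    rw [mnL_append_singleton _ _ hne, ih]
    dsimp only
    rw [show ((c:Int) + 1) = (((c+1 : Nat)) : Int) by push_cast; ring,
        restEq arr N K (c+1) hN (by omega)]
    have htne : (arr.take N).take (c+1) ≠ [] := List.ne_nil_of_length_pos (by simp; omega)
    have hrne : (arr.take N).take (c+1) ++ (arr.take N).drop (c+1+K) ≠ [] := by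
      intro h
      exact htne (List.append_eq_nil_iff.mp h).1
    rw [max_getD _ hrne, min_getD _ hrne]
    rfl

lemma mnL_take_one (a : List Int) (h : a ≠ []) : mnL (a.take 1) = a.getD 0 0 := by
  cases a with | nil => simp at h | cons x t => rfl

lemma mxL_take_one (a : List Int) (h : a ≠ []) : mxL (a.take 1) = a.getD 0 0 := by
  cases a with | nil => simp at h | cons x t => rfl

lemma getD_zero_take (arr : List Int) (N : Nat) (h : 0 < N) :
    (arr.take N).getD 0 0 = arr.getD 0 0 := by
  cases arr with
  | nil => simp
  | cons x t => cases N with | zero => omega | succ m => rfl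

lemma A_eq (n k : Int) (arr : List Int)
    (hpre : 1 ≤ n ∧ n ≤ (arr.length : Int) ∧ 0 ≤ k ∧ k < n) :
    minimizeDifference n k arr = bestW (arr.take n.toNat) k.toNat (n.toNat - k.toNat) := by
  obtain ⟨hp1, hp2, hp3, hp4⟩ := hpre
  set N := n.toNat with hNdef
  set K := k.toNat with hKdef
  have hn : n = (N : Int) := by omega
  have hk : k = (K : Int) := by omega
  have hN : N ≤ arr.length := by omega
  have h1 : 1 ≤ N := by omega
  have hKN : K < N := by omega
  have hlen : (arr.take N).length = N := by simp; omega
  have hane : arr.take N ≠ [] := List.ne_nil_of_length_pos (by omega)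
  have hsetlen : ∀ v : Int, (PySem.List.pySetD (List.replicate N 0) (n - 1) v).length = N := by
    intro v
    rw [show n - 1 = (((N - 1 : Nat)) : Int) by omega, PySem.List.pySetD_natCast]
    simp
  have hsetget : ∀ v : Int,
      PySem.List.pyGetD (PySem.List.pySetD (List.replicate N 0) (n - 1) v) (((N - 1 : Nat)) : Int) 0 = v := by
    intro v
    rw [show n - 1 = (((N - 1 : Nat)) : Int) by omega, PySem.List.pySetD_natCast,
        PySem.List.pyGetD_natCast]
    rw [List.getD, List.getElem?_set_self (by simp; omega)]
    rfl
  have hv : PySem.List.pyGetD arr (n - 1) 0 = ((arr.take N))[N-1]'(by omega) := by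
    rw [show n - 1 = (((N - 1 : Nat)) : Int) by omega, PySem.List.pyGetD_natCast,
        List.getD_eq_getElem _ _ (by omega)]
    simp [List.getElem_take]
  have hgo := goA_spec arr N hN (n - 2)
    (PySem.List.pySetD (List.replicate N 0) (n - 1) (PySem.List.pyGetD arr (n - 1) 0))
    (PySem.List.pySetD (List.replicate N 0) (n - 1) (PySem.List.pyGetD arr (n - 1) 0))
    (by omega) (hsetlen _) (hsetlen _)
    (by
      intro j hj1 hj2
      have hj : j = N - 1 := by omega
      subst hj
      rw [hsetget, hv, mxL_drop_last _ _ (by omega), mnL_drop_last _ _ (by omega)]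
      exact ⟨rfl, rfl⟩)
  have hPm : ∀ j : Nat, j < N →
      PySem.List.pyGetD (goA arr (n - 2)
        (PySem.List.pySetD (List.replicate N 0) (n - 1) (PySem.List.pyGetD arr (n - 1) 0))
        (PySem.List.pySetD (List.replicate N 0) (n - 1) (PySem.List.pyGetD arr (n - 1) 0))).1 (j : Int) 0
        = mxL ((arr.take N).drop j) := fun j hj => (hgo j hj).1
  have hPn : ∀ j : Nat, j < N →
      PySem.List.pyGetD (goA arr (n - 2)
        (PySem.List.pySetD (List.replicate N 0) (n - 1) (PySem.List.pyGetD arr (n - 1) 0))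
        (PySem.List.pySetD (List.replicate N 0) (n - 1) (PySem.List.pyGetD arr (n - 1) 0))).2 (j : Int) 0
        = mnL ((arr.take N).drop j) := fun j hj => (hgo j hj).2
  rw [minimizeDifference]
  rw [show n.toNat = N from rfl]
  have hres0 : PySem.List.pyGetD (goA arr (n - 2)
        (PySem.List.pySetD (List.replicate N 0) (n - 1) (PySem.List.pyGetD arr (n - 1) 0))
        (PySem.List.pySetD (List.replicate N 0) (n - 1) (PySem.List.pyGetD arr (n - 1) 0))).1 k 0
      - PySem.List.pyGetD (goA arr (n - 2)
        (PySem.List.pySetD (List.replicate N 0) (n - 1) (PySem.List.pyGetD arr (n - 1) 0))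
        (PySem.List.pySetD (List.replicate N 0) (n - 1) (PySem.List.pyGetD arr (n - 1) 0))).2 k 0
      = wRange (arr.take N) K 0 := by
    rw [hk, hPm K hKN, hPn K hKN]
    simp [wRange]
  have hinit : PySem.List.pyGetD arr 0 0 = mnL ((arr.take N).take 1) ∧
      PySem.List.pyGetD arr 0 0 = mxL ((arr.take N).take 1) := by
    rw [PySem.List.pyGetD_zero, mnL_take_one _ hane, mxL_take_one _ hane, getD_zero_take _ _ (by omega)]
    exact ⟨rfl, rfl⟩
  rw [show ((PySem.List.pyGetD (goA arr (n - 2)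
        (PySem.List.pySetD (List.replicate N 0) (n - 1) (PySem.List.pyGetD arr (n - 1) 0))
        (PySem.List.pySetD (List.replicate N 0) (n - 1) (PySem.List.pyGetD arr (n - 1) 0))).1 k 0
      - PySem.List.pyGetD (goA arr (n - 2)
        (PySem.List.pySetD (List.replicate N 0) (n - 1) (PySem.List.pyGetD arr (n - 1) 0))
        (PySem.List.pySetD (List.replicate N 0) (n - 1) (PySem.List.pyGetD arr (n - 1) 0))).2 k 0,
      PySem.List.pyGetD arr 0 0, PySem.List.pyGetD arr 0 0)
      : Int × Int × Int)
      = (wRange (arr.take N) K 0, mnL ((arr.take N).take 1), mxL ((arr.take N).take 1))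
    from Prod.ext hres0 (Prod.ext hinit.1 hinit.2)]
  rw [show n - k = 1 + (((N - K - 1 : Nat)) : Int) by omega, hk]
  rw [loopA arr N K _ _ hN h1 hKN hPm hPn (N - K - 1) (by omega)]
  have hNK : N - K - 1 + 1 = N - K := by omega
  rw [hNK]
  have hdropnil : (arr.take N).drop (N - K + K) = [] := by rw [List.drop_eq_nil_iff]; omega
  have hw : wRange (arr.take N) K (N - K) = mxL ((arr.take N).take (N - K)) - mnL ((arr.take N).take (N - K)) := by
    rw [wRange, hdropnil, List.append_nil]
  have hbw : bestW (arr.take N) K (N - K) = min (bestW (arr.take N) K (N - K - 1)) (wRange (arr.take N) K (N - K)) := by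
    rw [show N - K = (N - K - 1) + 1 by omega]
    rw [show (N - K - 1) + 1 - 1 = N - K - 1 by omega]
    rfl
  rw [hbw, hw]

lemma B_eq (n k : Int) (arr : List Int)
    (hpre : 1 ≤ n ∧ n ≤ (arr.length : Int) ∧ 0 ≤ k ∧ k < n) :
    minimizeDifference_alt n k arr = bestW (arr.take n.toNat) k.toNat (n.toNat - k.toNat) := by
  obtain ⟨hp1, hp2, hp3, hp4⟩ := hpre
  set N := n.toNat with hNdef
  set K := k.toNat with hKdef
  have hn : n = (N : Int) := by omega
  have hk : k = (K : Int) := by omega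
  have hN : N ≤ arr.length := by omega
  have h1 : 1 ≤ N := by omega
  have hKN : K < N := by omega
  rw [minimizeDifference_alt]
  rw [show n - k + 1 = (((N - K : Nat)) : Int) + 1 by omega, hk, hn]
  obtain ⟨hne, hval⟩ := loopB arr N K hN h1 hKN (N - K) (le_refl _)
  rw [min_getD _ hne, hval]

-- ===== VERDICT (by name: the statement is the Claim_ definition above) =====
theorem minimizeDifference_spec : Claim_equal_minimizeDifference := by
  intro n k arr _ hpre
  unfold Pre_minimizeDifference at hpre
  show minimizeDifference n k arr = minimizeDifference_alt n k arr
  rw [A_eq n k arr hpre, B_eq n k arr hpre]
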